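-- pv_equiv track=rewrite | github.com/9shivansh/30DayMayChallenge | ManasaAndStones.py | stones
-- ===== SOURCE A (Python) =====
-- def stones(n, a, b):
--
--     c = []
--     p = 0
--     for i in range(0, n):
--         p = (i * a) + ((n - 1 - i) * b)
--         if not p in c:
--             c.append(p)
--
--     c.sort()
--     return c
-- ===== SOURCE B (Python) =====
-- def stones(n, a, b):
--     # closed form: the possible last values form an arithmetic progression
--     if n <= 0:
--         return []
--     if a == b:
--         return [(n - 1) * a]
--     lo, hi = min(a, b), max(a, b)
--     return [i * hi + (n - 1 - i) * lo for i in range(n)]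
-- ===== Notes on version B (the rewrite author's own statement) =====
-- stated objective: faster
-- what changed: Replaces the per-element membership dedup loop plus final sort with a closed-form construction: the values form an arithmetic progression, so B emits the n distinct values (or the single value when a==b) directly in ascending order.
import Mathlib
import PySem

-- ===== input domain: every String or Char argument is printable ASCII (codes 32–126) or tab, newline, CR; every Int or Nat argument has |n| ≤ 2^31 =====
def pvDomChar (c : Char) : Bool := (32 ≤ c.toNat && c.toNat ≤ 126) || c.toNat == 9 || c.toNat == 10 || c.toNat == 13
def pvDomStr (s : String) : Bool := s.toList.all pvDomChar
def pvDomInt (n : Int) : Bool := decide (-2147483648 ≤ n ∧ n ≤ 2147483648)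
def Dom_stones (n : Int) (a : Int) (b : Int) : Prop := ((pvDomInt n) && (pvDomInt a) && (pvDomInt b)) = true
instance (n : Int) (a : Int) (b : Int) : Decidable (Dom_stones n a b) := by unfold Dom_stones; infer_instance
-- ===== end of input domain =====

-- B replaces A's membership-dedup loop + sort with the closed-form arithmetic
-- progression emitted directly in ascending order.

-- ===== PORT A =====
-- loop body of A: p = i*a + (n-1-i)*b; append p to c unless already present
def stonesStep (n : Int) (a : Int) (b : Int) (c : List Int) (i : Int) : List Int :=
  let p := (i * a) + ((n - 1 - i) * b)
  if p ∈ c then c else c ++ [p]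

def stones (n : Int) (a : Int) (b : Int) : List Int :=
  PySem.List.sorted ((PySem.List.pyRange 0 n 1).foldl (stonesStep n a b) []) (fun x => x) false

-- ===== PORT B =====
def stones_alt (n : Int) (a : Int) (b : Int) : List Int :=
  if n ≤ 0 then []
  else if a = b then [(n - 1) * a]
  else
    (PySem.List.pyRange 0 n 1).map (fun i => i * (max a b) + (n - 1 - i) * (min a b))

-- ===== PRECONDITION & SPEC =====
def Spec_stones (n : Int) (a : Int) (b : Int) (out : List Int) : Prop := out = stones_alt n a b
instance (n : Int) (a : Int) (b : Int) (out : List Int) : Decidable (Spec_stones n a b out) := by unfold Spec_stones; infer_instance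

-- ===== CLAIM (what is proved, stated in full; the proofs are below) =====
def Claim_equal_stones : Prop := ∀ (n : Int) (a : Int) (b : Int), Dom_stones n a b → Spec_stones n a b (stones n a b)

-- ===== LEMMAS AND PROOFS =====

theorem stonesStep_eq (n a b : Int) :
    stonesStep n a b = fun c i =>
      if i * a + (n - 1 - i) * b ∈ c then c else c ++ [i * a + (n - 1 - i) * b] := rfl

-- A's dedup loop is a no-op once every produced value is already in the accumulator
theorem foldl_dedup_const (g : Int → Int) (l : List Int) (acc : List Int)
    (h : ∀ i ∈ l, g i ∈ acc) :
    l.foldl (fun c i => if g i ∈ c then c else c ++ [g i]) acc = acc := by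
  induction l with
  | nil => rfl
  | cons x xs ih =>
      simp only [List.foldl_cons, if_pos (h x (List.mem_cons_self))]
      exact ih (fun i hi => h i (List.mem_cons_of_mem _ hi))

-- when all produced values are fresh, A's dedup loop just appends them all
theorem foldl_dedup_append (g : Int → Int) (l : List Int) (acc : List Int)
    (h : (acc ++ l.map g).Nodup) :
    l.foldl (fun c i => if g i ∈ c then c else c ++ [g i]) acc = acc ++ l.map g := by
  induction l generalizing acc with
  | nil => simp
  | cons x xs ih =>
      have hx : g x ∉ acc := by
        intro hmem
        exact (List.nodup_append.mp h).2.2 _ hmem _ (by simp) rfl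
      simp only [List.foldl_cons, if_neg hx]
      rw [ih (acc ++ [g x]) (by simpa using h)]
      simp

theorem stones_eq (n a b : Int) : stones n a b = stones_alt n a b := by
  unfold stones stones_alt
  rw [stonesStep_eq]
  by_cases hn : n ≤ 0
  · have hr : PySem.List.pyRange 0 n 1 = [] := by
      rw [PySem.List.pyRange_one]
      have h0 : (n - 0).toNat = 0 := by omega
      rw [h0]
      rfl
    rw [hr, if_pos hn]
    exact PySem.List.sorted_eq_of_perm_of_pairwise_lt [] [] _ (List.Perm.refl _) List.Pairwise.nil
  · rw [if_neg hn]
    have hcons : PySem.List.pyRange 0 n 1 = 0 :: PySem.List.pyRange 1 n 1 :=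
      PySem.List.pyRange_one_cons (by omega)
    by_cases hab : a = b
    · rw [if_pos hab]
      subst hab
      rw [hcons]
      simp only [List.foldl_cons, List.not_mem_nil, List.nil_append]
      have h0 : (0 : Int) * a + (n - 1 - 0) * a = (n - 1) * a := by ring
      rw [h0]
      rw [foldl_dedup_const (fun i => i * a + (n - 1 - i) * a) _ _ (by
        intro i _
        have hi : i * a + (n - 1 - i) * a = (n - 1) * a := by ring
        simp [hi])]
      exact PySem.List.sorted_eq_of_perm_of_pairwise_lt _ _ _ (List.Perm.refl _)
        (List.pairwise_singleton _ _)
    · rw [if_neg hab]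
      set g : Int → Int := fun i => i * a + (n - 1 - i) * b with hg
      have hginj : Function.Injective g := by
        intro i j hij
        simp only [hg] at hij
        rcases lt_or_gt_of_ne hab with h | h
        · nlinarith [hij]
        · nlinarith [hij]
      have hnodup : ((PySem.List.pyRange 0 n 1).map g).Nodup :=
        (PySem.List.nodup_pyRange_one 0 n).map hginj
      rw [foldl_dedup_append g _ [] (by simpa using hnodup)]
      simp only [List.nil_append]
      rcases lt_or_gt_of_ne hab with hlt | hgt
      · -- a < b : A's values decrease in i; B's list is the same multiset, reversed
        rw [max_eq_right hlt.le, min_eq_left hlt.le]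
        apply PySem.List.sorted_eq_of_perm_of_pairwise_lt
        · have hmm : (PySem.List.pyRange 0 n 1).map (fun i => i * b + (n - 1 - i) * a)
              = ((PySem.List.pyRange 0 n 1).map (fun i => n - 1 - i)).map g := by
            rw [List.map_map]
            apply List.map_congr_left
            intro i _
            simp only [Function.comp, hg]
            ring
          rw [hmm]
          apply List.Perm.map
          rw [List.perm_ext_iff_of_nodup
            ((PySem.List.nodup_pyRange_one 0 n).map (by intro i j h; dsimp only at h; omega))
            (PySem.List.nodup_pyRange_one 0 n)]
          intro x
          simp only [List.mem_map, PySem.List.mem_pyRange_one]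
          constructor
          · rintro ⟨i, ⟨h1, h2⟩, rfl⟩; omega
          · rintro ⟨h1, h2⟩; exact ⟨n - 1 - x, by omega, by omega⟩
        · exact List.Pairwise.map _
            (fun i j hij => by nlinarith [mul_pos (sub_pos.mpr hij) (sub_pos.mpr hlt)])
            (PySem.List.pairwise_lt_pyRange_one 0 n)
      · -- a > b : A's values are already increasing and coincide with B's list
        rw [max_eq_left hgt.le, min_eq_right hgt.le]
        apply PySem.List.sorted_eq_of_perm_of_pairwise_lt
        · apply List.Perm.of_eq
          apply List.map_congr_left
          intro i _
          simp only [hg]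
        · exact List.Pairwise.map _
            (fun i j hij => by nlinarith [mul_pos (sub_pos.mpr hij) (sub_pos.mpr hgt)])
            (PySem.List.pairwise_lt_pyRange_one 0 n)

-- ===== VERDICT (by name: the statement is the Claim_ definition above) =====
theorem stones_spec : Claim_equal_stones := by
  intro n a b _
  unfold Spec_stones
  exact stones_eq n a b
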